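-- pv_equiv track=rewrite | github.com/vbenv/Excercise | python/codingtest/cote.py | solution
-- ===== SOURCE A (Python) =====
-- def solution(arr):
--     i = 0
--     stk = []
--     while i < len(arr):
--         # stk is empty, append arr[i] to stk and add 1 to i
--         if (len(stk) == 0):
--             stk.append(arr[i])
--             i += 1
--         # last element in stk is smaller than arr[i], append arr[i] to stk
--         elif stk[-1] < arr[i]:
--             stk.append(arr[i])
--             i += 1
--         else:
--             stk.pop()
--
--     return stk
-- ===== SOURCE B (Python) =====
-- def solution(arr):
--     res = []
--     for x in reversed(arr):
--         if not res or x < res[-1]: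
--             res.append(x)
--     return res[::-1]
-- ===== Notes on version B (the rewrite author's own statement) =====
-- stated objective: simpler
-- what changed: Replaces the index-advancing push/pop stack loop with a single right-to-left running-minimum scan that keeps exactly the elements strictly smaller than everything to their right.
import Mathlib
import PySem

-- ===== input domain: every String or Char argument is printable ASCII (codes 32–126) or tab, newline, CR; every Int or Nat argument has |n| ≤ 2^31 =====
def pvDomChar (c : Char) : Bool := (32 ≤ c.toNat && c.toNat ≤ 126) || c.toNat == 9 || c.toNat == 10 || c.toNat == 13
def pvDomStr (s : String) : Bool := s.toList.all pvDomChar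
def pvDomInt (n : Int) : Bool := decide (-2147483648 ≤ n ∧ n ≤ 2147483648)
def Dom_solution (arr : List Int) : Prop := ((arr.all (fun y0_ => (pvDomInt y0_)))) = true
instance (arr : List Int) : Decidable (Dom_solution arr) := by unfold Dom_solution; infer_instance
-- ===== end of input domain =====

-- B replaces A's index-advancing push/pop stack loop with one right-to-left
-- running-minimum scan (objective: simpler); same O(n) cost.

-- ===== PORT A =====
-- The Python stack is represented with its TOP at the Lean list HEAD
-- (stk.append x = x :: stk, stk[-1] = head, stk.pop = tail); the returned
-- Python list (bottom-to-top) is therefore stk.reverse.  Python's i is a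
-- loop counter that stays in 0..len(arr), so Nat is exact here.
def loopA (arr : List Int) (i : Nat) (stk : List Int) : List Int :=
  if h : i < arr.length then
    match stk with
    | [] => loopA arr (i + 1) [arr[i]]
    | y :: ys =>
      if y < arr[i] then loopA arr (i + 1) (arr[i] :: y :: ys)
      else loopA arr i ys
  else stk.reverse
termination_by 2 * (arr.length - i) + stk.length
decreasing_by all_goals simp only [List.length_cons, List.length_nil]; omega

def solution (arr : List Int) : List Int := loopA arr 0 []

-- ===== PORT B =====
-- res is kept with its python TOP (res[-1]) at the Lean head; since python
-- returns res[::-1], the Lean accumulator is already the returned list.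
def stepB (res : List Int) (x : Int) : List Int :=
  match res with
  | [] => [x]
  | y :: _ => if x < y then x :: res else res

def solution_alt (arr : List Int) : List Int := arr.reverse.foldl stepB []

-- ===== PRECONDITION & SPEC =====
def Spec_solution (arr : List Int) (out : List Int) : Prop := out = solution_alt arr
instance (arr : List Int) (out : List Int) : Decidable (Spec_solution arr out) := by unfold Spec_solution; infer_instance

-- ===== CLAIM (what is proved, stated in full; the proofs are below) =====
def Claim_equal_solution : Prop := ∀ (arr : List Int), Dom_solution arr → Spec_solution arr (solution arr)

-- ===== LEMMAS AND PROOFS =====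

-- common specification: keep an element iff it is strictly below all later elements
def spec : List Int → List Int
  | [] => []
  | a :: t => if t.all (fun x => a < x) then a :: spec t else spec t

-- one pop-all-at-once step of A's loop
def stepA (stk : List Int) (x : Int) : List Int :=
  x :: stk.dropWhile (fun y => decide (x ≤ y))

theorem spec_subset : ∀ (t : List Int) (x : Int), x ∈ spec t → x ∈ t := by
  intro t
  induction t with
  | nil => simp [spec]
  | cons a t ih =>
    intro x hx
    simp only [spec] at hx
    split at hx
    · rcases List.mem_cons.mp hx with h | h
      · simp [h]
      · exact List.mem_cons_of_mem _ (ih x h)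
    · exact List.mem_cons_of_mem _ (ih x hx)

theorem spec_ne_nil : ∀ (t : List Int), t ≠ [] → spec t ≠ [] := by
  intro t
  induction t with
  | nil => simp
  | cons a t ih =>
    intro _
    simp only [spec]
    split
    · simp
    · rename_i hall
      cases t with
      | nil => simp at hall
      | cons b t' => exact ih (by simp)

theorem spec_head_min : ∀ (t : List Int), t ≠ [] →
    ∃ m, (spec t).head? = some m ∧ m ∈ t ∧ ∀ x ∈ t, m ≤ x := by
  intro t
  induction t with
  | nil => simp
  | cons a t ih =>
    intro _
    simp only [spec]
    split
    · rename_i hall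
      refine ⟨a, by simp, by simp, ?_⟩
      intro x hx
      rcases List.mem_cons.mp hx with h | h
      · omega
      · exact le_of_lt (by simpa using (List.all_eq_true.mp hall x h))
    · rename_i hall
      cases t with
      | nil => simp at hall
      | cons b t' =>
        obtain ⟨m, hm1, hm2, hm3⟩ := ih (by simp)
        refine ⟨m, hm1, List.mem_cons_of_mem _ hm2, ?_⟩
        intro x hx
        rcases List.mem_cons.mp hx with h | h
        · obtain ⟨c, hc, hca⟩ : ∃ c ∈ b :: t', ¬ a < c := by
            by_contra hcon
            push Not at hcon
            exact hall (List.all_eq_true.mpr (fun c hc => decide_eq_true (hcon c hc)))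
          have := hm3 c hc
          omega
        · exact hm3 x h

theorem spec_sorted : ∀ (t : List Int), (spec t).Pairwise (· < ·) := by
  intro t
  induction t with
  | nil => simp [spec]
  | cons a t ih =>
    simp only [spec]
    split
    · rename_i hall
      exact List.pairwise_cons.mpr
        ⟨fun x hx => by simpa using List.all_eq_true.mp hall x (spec_subset t x hx), ih⟩
    · exact ih

theorem alt_eq_spec : ∀ (t : List Int), solution_alt t = spec t := by
  intro t
  induction t with
  | nil => rfl
  | cons a t ih =>
    have hfold : solution_alt (a :: t) = stepB (solution_alt t) a := by
      simp [solution_alt, List.reverse_cons, List.foldl_append]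
    rw [hfold, ih]
    by_cases ht : t = []
    · subst ht; simp [spec, stepB]
    · obtain ⟨m, hm1, hm2, hm3⟩ := spec_head_min t ht
      cases hs : spec t with
      | nil => exact absurd hs (spec_ne_nil t ht)
      | cons y ys =>
        have hym : y = m := by simp [hs] at hm1; omega
        subst hym
        simp only [stepB, spec]
        by_cases hlt : a < y
        · have : t.all (fun x => a < x) = true :=
            List.all_eq_true.mpr (fun x hx =>
              decide_eq_true (lt_of_lt_of_le hlt (hm3 x hx)))
          simp [hlt, this, hs]
        · have : ¬ t.all (fun x => a < x) = true := by
            intro hall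
            exact hlt (by simpa using List.all_eq_true.mp hall y hm2)
          simp [hlt, this, hs]

-- A's loop equals a fold of the pop-all-at-once step over the remaining suffix
theorem loopA_eq_foldl : ∀ (arr : List Int) (i : Nat) (stk : List Int),
    loopA arr i stk = ((arr.drop i).foldl stepA stk).reverse := by
  intro arr i stk
  induction i, stk using loopA.induct arr with
  | case1 i h ih =>
    rw [loopA]
    simp only [h, dite_true]
    rw [ih, List.drop_eq_getElem_cons h, List.foldl_cons]
    have hs : stepA [] arr[i] = [arr[i]] := by simp [stepA]
    rw [hs]
  | case2 i h y ys hlt ih =>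
    rw [loopA]
    simp only [h, dite_true, hlt, if_true]
    rw [ih, List.drop_eq_getElem_cons h, List.foldl_cons]
    have hs : stepA (y :: ys) arr[i] = arr[i] :: y :: ys := by
      unfold stepA
      rw [List.dropWhile_cons]
      simp [show ¬ arr[i] ≤ y by omega]
    rw [hs]
  | case3 i h y ys hlt ih =>
    rw [loopA]
    simp only [h, dite_true, hlt, if_false]
    rw [ih, List.drop_eq_getElem_cons h, List.foldl_cons, List.foldl_cons]
    have hs : stepA ys arr[i] = stepA (y :: ys) arr[i] := by
      unfold stepA
      rw [List.dropWhile_cons]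
      simp [show arr[i] ≤ y by omega]
    rw [hs]
  | case4 i stk h =>
    rw [loopA]
    simp only [h, dite_false]
    rw [List.drop_of_length_le (by omega), List.foldl_nil]

-- on a strictly decreasing list, popping the elements ≥ x is filtering to those < x
theorem dropWhile_eq_filter_of_decreasing :
    ∀ (r : List Int) (x : Int), r.Pairwise (· > ·) →
      r.dropWhile (fun y => decide (x ≤ y)) = r.filter (fun y => decide (y < x)) := by
  intro r x hr
  induction r with
  | nil => rfl
  | cons h tl ih =>
    rw [List.pairwise_cons] at hr
    by_cases hx : x ≤ h
    · simp only [List.dropWhile, List.filter, decide_eq_true hx,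
        decide_eq_false (show ¬ h < x by omega)]
      exact ih hr.2
    · have htl : tl.filter (fun y => decide (y < x)) = tl := by
        apply List.filter_eq_self.mpr
        intro y hy
        exact decide_eq_true (by have := hr.1 y hy; omega)
      simp only [List.dropWhile, List.filter, decide_eq_false hx,
        decide_eq_true (show h < x by omega), htl]

theorem spec_append : ∀ (t : List Int) (x : Int),
    spec (t ++ [x]) = (spec t).filter (fun y => decide (y < x)) ++ [x] := by
  intro t x
  induction t with
  | nil => simp [spec]
  | cons a t ih =>
    simp only [List.cons_append, spec, List.all_append, List.all_cons, List.all_nil,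
      Bool.and_true]
    by_cases hall : t.all (fun y => a < y) = true
    · by_cases hax : a < x
      · simp [hall, hax, ih]
      · simp [hall, hax, ih]
    · have : (t.all (fun y => a < y) && decide (a < x)) = false := by
        simp [Bool.eq_false_iff.mpr hall]
      simp [hall, ih]

theorem foldl_stepA_eq_spec : ∀ (t : List Int), t.foldl stepA [] = (spec t).reverse := by
  intro t
  induction t using List.reverseRecOn with
  | nil => rfl
  | append_singleton t x ih =>
    rw [List.foldl_append, List.foldl_cons, List.foldl_nil, ih, spec_append]
    simp only [stepA, List.reverse_append, List.reverse_cons, List.reverse_nil,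
      List.nil_append, List.cons_append, List.nil_append]
    congr 1
    rw [dropWhile_eq_filter_of_decreasing _ x
      (by simpa using List.Pairwise.reverse (spec_sorted t)), List.filter_reverse]

-- ===== VERDICT (by name: the statement is the Claim_ definition above) =====
theorem solution_spec : Claim_equal_solution := by
  intro arr _
  unfold Spec_solution
  rw [solution, loopA_eq_foldl, List.drop_zero, foldl_stepA_eq_spec,
    List.reverse_reverse, alt_eq_spec]
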